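-- pv_equiv track=rewrite | github.com/MaRcR11/aoc | py/2025/4/2.py | solve
-- ===== SOURCE A (Python) =====
-- from collections import deque
--
-- def solve(input_data: str) -> str:
--     g = [list(l) for l in input_data.strip().splitlines()]
--     R, C = len(g), len(g[0])
--     d = [(-1, -1), (-1, 0), (-1, 1), (0, -1), (0, 1), (1, -1), (1, 0), (1, 1)]
--     deg = [[0] * C for _ in range(R)]
--
--     for r in range(R):
--         for c in range(C):
--             if g[r][c] == "@":
--                 deg[r][c] = sum(
--                     0 <= r + dr < R and 0 <= c + dc < C and g[r + dr][c + dc] == "@"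
--                     for dr, dc in d
--                 )
--
--     q = deque(
--         (r, c) for r in range(R) for c in range(C) if g[r][c] == "@" and deg[r][c] < 4
--     )
--     t = 0
--
--     while q:
--         r, c = q.popleft()
--         if g[r][c] != "@":
--             continue
--         g[r][c] = "."
--         t += 1
--         for dr, dc in d:
--             nr, nc = r + dr, c + dc
--             if 0 <= nr < R and 0 <= nc < C and g[nr][nc] == "@":
--                 deg[nr][nc] -= 1
--                 if deg[nr][nc] == 3:
--                     q.append((nr, nc))
--
--     return str(t)
-- ===== SOURCE B (Python) =====
-- def solve(input_data: str) -> str: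
--     g = [list(l) for l in input_data.strip().splitlines()]
--     R, C = len(g), len(g[0])
--     d = [(-1, -1), (-1, 0), (-1, 1), (0, -1), (0, 1), (1, -1), (1, 0), (1, 1)]
--     total = 0
--     while True:
--         doomed = [
--             (r, c)
--             for r in range(R)
--             for c in range(C)
--             if g[r][c] == "@"
--             and sum(
--                 0 <= r + dr < R and 0 <= c + dc < C and g[r + dr][c + dc] == "@"
--                 for dr, dc in d
--             ) < 4
--         ]
--         if not doomed:
--             break
--         for r, c in doomed:
--             g[r][c] = "."
--         total += len(doomed)
--     return str(total)
-- ===== Notes on version B (the rewrite author's own statement) =====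
-- stated objective: alternative
-- what changed: Replaces A's precomputed degree table and deque-driven cascade (decrement neighbours, enqueue cells whose degree drops below four) by round-based peeling: each round rescans the whole grid, recomputes every live cell's 8-neighbour count from the frozen grid, and removes all under-connected cells of the round at once; both compute the complement of the 4-core, so the removed count agrees.
import Mathlib
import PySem

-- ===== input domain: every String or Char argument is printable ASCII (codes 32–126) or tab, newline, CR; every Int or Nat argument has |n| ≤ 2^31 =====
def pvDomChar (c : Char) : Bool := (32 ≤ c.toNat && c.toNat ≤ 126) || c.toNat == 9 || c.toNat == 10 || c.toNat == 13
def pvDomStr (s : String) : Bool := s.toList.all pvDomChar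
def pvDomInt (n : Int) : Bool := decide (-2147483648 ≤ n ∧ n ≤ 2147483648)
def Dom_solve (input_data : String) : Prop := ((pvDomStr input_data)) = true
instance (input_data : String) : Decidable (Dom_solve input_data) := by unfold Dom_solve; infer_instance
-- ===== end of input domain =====

-- B replaces A's degree table + propagation deque by repeated whole-grid rescans that
-- remove all under-connected cells of a round simultaneously (objective: alternative).
-- A mutates no caller-visible data (it works on a fresh parse), so return-value equivalence is full equivalence.

-- ===== PORT A =====
-- shared helpers: parsing and 2-D cell access (both Python sources contain these same lines)
def pvGrid (input_data : String) : List (List Char) :=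
  (PySem.Str.splitlines (PySem.Str.strip input_data)).map String.toList

-- g[r][c] : in both programs every access is guarded to 0 ≤ r < R, 0 ≤ c < C; inside Pre_solve
-- (all rows at least as long as row 0) such an access cannot raise, so the '.'-default is unreachable there.
def pvGet2 (g : List (List Char)) (r c : Int) : Char :=
  ((PySem.List.pyGet? g r).bind (fun row => PySem.List.pyGet? row c)).getD '.'

-- g[r][c] = ch  (assignment; in-range whenever executed under Pre_solve)
def pvSet2 (g : List (List Char)) (r c : Int) (v : Char) : List (List Char) :=
  PySem.List.pySetD g r (PySem.List.pySetD (PySem.List.pyGetD g r []) c v)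

def pvDirs : List (Int × Int) :=
  [(-1, -1), (-1, 0), (-1, 1), (0, -1), (0, 1), (1, -1), (1, 0), (1, 1)]

-- the 8-neighbour count  sum(0 <= r+dr < R and 0 <= c+dc < C and g[r+dr][c+dc] == "@" for dr, dc in d)
-- (this very expression occurs in both Python sources: A uses it once to fill deg, B re-evaluates it each scan)
def pvNb (g : List (List Char)) (R C r c : Int) : Int :=
  (pvDirs.map (fun dd =>
    if 0 ≤ r + dd.1 ∧ r + dd.1 < R ∧ 0 ≤ c + dd.2 ∧ c + dd.2 < C ∧
        pvGet2 g (r + dd.1) (c + dd.2) = '@' then 1 else 0)).sum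

-- deg[r][c] lookups/updates (A only)
def pvDget (deg : List (List Int)) (r c : Int) : Int :=
  ((PySem.List.pyGet? deg r).bind (fun row => PySem.List.pyGet? row c)).getD 0

def pvDset (deg : List (List Int)) (r c : Int) (v : Int) : List (List Int) :=
  PySem.List.pySetD deg r (PySem.List.pySetD (PySem.List.pyGetD deg r []) c v)

-- the initial deg table of A
def pvDeg0 (g : List (List Char)) (R C : Int) : List (List Int) :=
  (PySem.List.pyRange 0 R 1).map (fun r =>
    (PySem.List.pyRange 0 C 1).map (fun c =>
      if pvGet2 g r c = '@' then pvNb g R C r c else 0))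

-- A's inner 'for dr, dc in d' body after g[r][c] = ".": decrement live neighbours, enqueue those reaching 3
def pvStep (g : List (List Char)) (R C r c : Int)
    (deg : List (List Int)) (q : List (Int × Int)) : List (List Int) × List (Int × Int) :=
  pvDirs.foldl (fun s dd =>
    let nr := r + dd.1
    let nc := c + dd.2
    if 0 ≤ nr ∧ nr < R ∧ 0 ≤ nc ∧ nc < C ∧ pvGet2 g nr nc = '@' then
      let deg2 := pvDset s.1 nr nc (pvDget s.1 nr nc - 1)
      (deg2, if pvDget deg2 nr nc = 3 then s.2 ++ [(nr, nc)] else s.2)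
    else s) (deg, q)

-- number of '@' in the whole grid (termination measure only)
def pvAtCount (g : List (List Char)) : Nat := (g.map (fun row => row.countP (· == '@'))).sum

theorem pvIdx_some_lt {n : Nat} {i : Int} {k : Nat}
    (h : PySem.List.pyIdx? n i = some k) : k < n := by
  unfold PySem.List.pyIdx? at h
  split_ifs at h <;> simp_all <;> omega

theorem pvCount_set {α : Type} (p : α → Bool) (row : List α) (j : Nat) (x : α)
    (hj : j < row.length) :
    (row.set j x).countP p + (if p row[j] then 1 else 0)
      = row.countP p + (if p x then 1 else 0) := by
  induction row generalizing j with
  | nil => simp at hj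
  | cons a l ih =>
    cases j with
    | zero => simp [List.countP_cons]; split_ifs <;> omega
    | succ j =>
      simp only [List.set_cons_succ, List.countP_cons, List.getElem_cons_succ]
      have := ih j (by simpa using hj)
      split_ifs at this ⊢ <;> omega

theorem pvAtCount_set (g : List (List Char)) (i : Nat) (x : List Char)
    (hi : i < g.length) :
    pvAtCount (g.set i x) + g[i].countP (· == '@')
      = pvAtCount g + x.countP (· == '@') := by
  induction g generalizing i with
  | nil => simp at hi
  | cons a l ih =>
    cases i with
    | zero => simp [pvAtCount]; omega
    | succ i =>
      simp only [List.set_cons_succ, pvAtCount, List.map_cons, List.sum_cons,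
        List.getElem_cons_succ]
      have := ih i (by simpa using hi)
      simp only [pvAtCount] at this
      omega

theorem pvAtCount_set2_le (g : List (List Char)) (r c : Int) :
    pvAtCount (pvSet2 g r c '.') ≤ pvAtCount g := by
  unfold pvSet2 PySem.List.pySetD PySem.List.pySet? PySem.List.pyGetD PySem.List.pyGet?
  cases h : PySem.List.pyIdx? g.length r with
  | none => simp
  | some i =>
    have hi := pvIdx_some_lt h
    simp only [Option.map_some, Option.getD_some, Option.bind_some,
      List.getElem?_eq_getElem hi]
    cases h2 : PySem.List.pyIdx? g[i].length c with
    | none => simp [List.set_getElem_self]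
    | some j =>
      have hj := pvIdx_some_lt h2
      simp only [Option.map_some, Option.getD_some]
      have h3 := pvAtCount_set g i (g[i].set j '.') hi
      have h4 := pvCount_set (· == '@') g[i] j '.' hj
      rcases Bool.eq_false_or_eq_true (g[i][j] == '@') with hb | hb <;>
        simp [hb] at h4 <;> omega

theorem pvAtCount_set2_lt (g : List (List Char)) (r c : Int) (h : pvGet2 g r c = '@') :
    pvAtCount (pvSet2 g r c '.') < pvAtCount g := by
  unfold pvGet2 PySem.List.pyGet? at h
  unfold pvSet2 PySem.List.pySetD PySem.List.pySet? PySem.List.pyGetD PySem.List.pyGet?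
  cases hr : PySem.List.pyIdx? g.length r with
  | none => rw [hr] at h; simp at h
  | some i =>
    have hi := pvIdx_some_lt hr
    rw [hr] at h
    simp only [Option.bind_some, List.getElem?_eq_getElem hi,
      Option.map_some, Option.getD_some] at h ⊢
    cases h2 : PySem.List.pyIdx? g[i].length c with
    | none => rw [h2] at h; simp at h
    | some j =>
      have hj := pvIdx_some_lt h2
      rw [h2] at h
      simp only [Option.bind_some, List.getElem?_eq_getElem hj, Option.getD_some] at h
      simp only [Option.map_some, Option.getD_some]
      have h3 := pvAtCount_set g i (g[i].set j '.') hi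
      have h4 := pvCount_set (· == '@') g[i] j '.' hj
      rw [h] at h4
      simp at h4
      omega

theorem pvStep_len_le (g : List (List Char)) (R C r c : Int) (deg : List (List Int))
    (q : List (Int × Int)) : (pvStep g R C r c deg q).2.length ≤ q.length + 8 := by
  unfold pvStep
  have gen : ∀ (ds : List (Int × Int)) (s : List (List Int) × List (Int × Int)),
      (ds.foldl (fun s dd =>
        let nr := r + dd.1
        let nc := c + dd.2
        if 0 ≤ nr ∧ nr < R ∧ 0 ≤ nc ∧ nc < C ∧ pvGet2 g nr nc = '@' then
          let deg2 := pvDset s.1 nr nc (pvDget s.1 nr nc - 1)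
          (deg2, if pvDget deg2 nr nc = 3 then s.2 ++ [(nr, nc)] else s.2)
        else s) s).2.length ≤ s.2.length + ds.length := by
    intro ds
    induction ds with
    | nil => simp
    | cons d ds ih =>
      intro s
      simp only [List.foldl_cons, List.length_cons]
      refine le_trans (ih _) ?_
      split_ifs <;> simp <;> omega
  exact le_trans (gen pvDirs (deg, q)) (by simp [pvDirs])

-- A's 'while q:' loop
def pvAloop (R C : Int) (g : List (List Char)) (deg : List (List Int))
    (q : List (Int × Int)) (t : Int) : List (List Char) × Int :=
  match q with
  | [] => (g, t)
  | (r, c) :: q' =>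
    if pvGet2 g r c ≠ '@' then pvAloop R C g deg q' t
    else
      let g2 := pvSet2 g r c '.'
      let s := pvStep g2 R C r c deg q'
      pvAloop R C g2 s.1 s.2 (t + 1)
termination_by 9 * pvAtCount g + q.length
decreasing_by
  · simp
  · have h1 := pvAtCount_set2_lt g r c (by simpa using ‹¬¬pvGet2 g r c = '@'›)
    have h2 := pvStep_len_le (pvSet2 g r c '.') R C r c deg q'
    simp only [List.length_cons]
    omega

def solve (input_data : String) : String :=
  let g := pvGrid input_data
  let R : Int := g.length
  -- len(g[0]): raises IndexError on an empty grid (excluded by Pre_solve); 0 is a dead value there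
  let C : Int := (PySem.List.pyGetD g 0 []).length
  let deg := pvDeg0 g R C
  let q := (PySem.List.pyRange 0 R 1).flatMap (fun r =>
    (PySem.List.pyRange 0 C 1).filterMap (fun c =>
      if pvGet2 g r c = '@' ∧ pvDget deg r c < 4 then some (r, c) else none))
  (PySem.Int.toStr (pvAloop R C g deg q 0).2)

-- ===== PORT B =====
-- one rescan of B: every '@' cell whose recomputed neighbour count is < 4
def pvDoomed (g : List (List Char)) (R C : Int) : List (Int × Int) :=
  (PySem.List.pyRange 0 R 1).flatMap (fun r =>
    (PySem.List.pyRange 0 C 1).filterMap (fun c =>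
      if pvGet2 g r c = '@' ∧ pvNb g R C r c < 4 then some (r, c) else none))

theorem pvDoomed_at (g : List (List Char)) (R C : Int) (p : Int × Int)
    (hp : p ∈ pvDoomed g R C) : pvGet2 g p.1 p.2 = '@' := by
  unfold pvDoomed at hp
  simp only [List.mem_flatMap, List.mem_filterMap] at hp
  obtain ⟨r, -, c, -, hc⟩ := hp
  split_ifs at hc with hcond
  cases hc; exact hcond.1

theorem pvAtCount_foldl_le (g : List (List Char)) (ds : List (Int × Int)) :
    pvAtCount (ds.foldl (fun g2 p => pvSet2 g2 p.1 p.2 '.') g) ≤ pvAtCount g := by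
  induction ds generalizing g with
  | nil => simp
  | cons d ds ih =>
    simp only [List.foldl_cons]
    exact le_trans (ih _) (pvAtCount_set2_le g d.1 d.2)

-- B's 'while True:' loop
def pvBloop (R C : Int) (g : List (List Char)) (total : Int) : List (List Char) × Int :=
  match hd : pvDoomed g R C with
  | [] => (g, total)
  | p :: rest =>
    pvBloop R C ((p :: rest).foldl (fun g2 q => pvSet2 g2 q.1 q.2 '.') g)
      (total + (p :: rest).length)
termination_by pvAtCount g
decreasing_by
  have h1 : pvGet2 g p.1 p.2 = '@' := pvDoomed_at g R C p (by rw [hd]; exact List.mem_cons_self)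
  calc pvAtCount (rest.foldl (fun g2 q => pvSet2 g2 q.1 q.2 '.') (pvSet2 g p.1 p.2 '.'))
      ≤ pvAtCount (pvSet2 g p.1 p.2 '.') := pvAtCount_foldl_le _ _
    _ < pvAtCount g := pvAtCount_set2_lt g p.1 p.2 h1

def solve_alt (input_data : String) : String :=
  let g := pvGrid input_data
  let R : Int := g.length
  -- len(g[0]): raises IndexError on an empty grid (excluded by Pre_solve); 0 is a dead value there
  let C : Int := (PySem.List.pyGetD g 0 []).length
  (PySem.Int.toStr (pvBloop R C g 0).2)

-- ===== PRECONDITION & SPEC =====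
-- A raises IndexError exactly when the stripped input has no lines (len(g[0])) or some line is
-- shorter than line 0 (g[r][c] with c < C inside the deg-filling loop); Pre_ excludes exactly those.
def Pre_solve (input_data : String) : Prop :=
  PySem.Str.splitlines (PySem.Str.strip input_data) ≠ [] ∧
  ∀ l ∈ PySem.Str.splitlines (PySem.Str.strip input_data),
    PySem.Str.len ((PySem.Str.splitlines (PySem.Str.strip input_data)).headD "") ≤ PySem.Str.len l

instance (input_data : String) : Decidable (Pre_solve input_data) := by
  unfold Pre_solve; infer_instance

def pvWitness_solve : String := "@@@\n@@@\n@@@"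

def Spec_solve (input_data : String) (out : String) : Prop := out = solve_alt input_data
instance (input_data : String) (out : String) : Decidable (Spec_solve input_data out) := by
  unfold Spec_solve; infer_instance

-- ===== CLAIM (what is proved, stated in full; the proofs are below) =====
def Claim_equal_solve : Prop :=
  ∀ (input_data : String), Dom_solve input_data → Pre_solve input_data →
    Spec_solve input_data (solve input_data)

-- ===== LEMMAS AND PROOFS =====

-- generic 2-D access (pvGet2/pvDget and pvSet2/pvDset are its instances at defaults '.' / 0)
def pvG {α : Type} (dflt : α) (g : List (List α)) (r c : Int) : α :=
  ((PySem.List.pyGet? g r).bind (fun row => PySem.List.pyGet? row c)).getD dflt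

def pvS {α : Type} (g : List (List α)) (r c : Int) (v : α) : List (List α) :=
  PySem.List.pySetD g r (PySem.List.pySetD (PySem.List.pyGetD g r []) c v)

theorem pvGet2_eq_pvG (g : List (List Char)) (r c : Int) : pvGet2 g r c = pvG '.' g r c := rfl
theorem pvSet2_eq_pvS (g : List (List Char)) (r c : Int) (v : Char) :
    pvSet2 g r c v = pvS g r c v := rfl
theorem pvDget_eq_pvG (deg : List (List Int)) (r c : Int) : pvDget deg r c = pvG 0 deg r c := rfl
theorem pvDset_eq_pvS (deg : List (List Int)) (r c : Int) (v : Int) :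
    pvDset deg r c v = pvS deg r c v := rfl

def pvInRb (R C : Int) (p : Int × Int) : Bool :=
  decide (0 ≤ p.1) && decide (p.1 < R) && decide (0 ≤ p.2) && decide (p.2 < C)

def pvShape {α : Type} (R C : Int) (g : List (List α)) : Prop :=
  (g.length : Int) = R ∧ ∀ row ∈ g, C ≤ (row.length : Int)

def pvLive (R C : Int) (g : List (List Char)) (p : Int × Int) : Bool :=
  pvInRb R C p && (pvGet2 g p.1 p.2 == '@')

def pvSdeg (P : Int × Int → Bool) (p : Int × Int) : Nat :=
  pvDirs.countP (fun dd => P (p.1 + dd.1, p.2 + dd.2))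

def pvCells (R C : Int) : List (Int × Int) :=
  (PySem.List.pyRange 0 R 1).flatMap (fun r =>
    (PySem.List.pyRange 0 C 1).map (fun c => (r, c)))

def pvLcount (R C : Int) (g : List (List Char)) : Nat :=
  (pvCells R C).countP (fun p => pvLive R C g p)

-- ---------- generic grid lemmas ----------

theorem pvS_mapLen {α : Type} (g : List (List α)) (r c : Int) (v : α) :
    (pvS g r c v).map List.length = g.map List.length := by
  unfold pvS PySem.List.pySetD PySem.List.pySet? PySem.List.pyGetD PySem.List.pyGet?
  cases h : PySem.List.pyIdx? g.length r with
  | none => simp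
  | some i =>
    have hi := pvIdx_some_lt h
    simp only [List.getElem?_eq_getElem hi, Option.bind_some, Option.getD_some,
      Option.map_some]
    cases h2 : PySem.List.pyIdx? g[i].length c with
    | none => simp [List.set_getElem_self]
    | some j =>
      simp only [Option.map_some, Option.getD_some]
      rw [List.map_set]
      have hl : (g[i].set j v).length = g[i].length := by simp
      rw [hl]
      have h3 : g[i].length = (g.map List.length)[i]'(by simpa using hi) := by simp
      rw [h3, List.set_getElem_self]

theorem pvShape_pvS {α : Type} (R C : Int) (g : List (List α)) (hs : pvShape R C g)
    (r c : Int) (v : α) : pvShape R C (pvS g r c v) := by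
  have hm := pvS_mapLen g r c v
  constructor
  · have : (pvS g r c v).length = g.length := by
      have := congrArg List.length hm
      simpa using this
    rw [this]; exact hs.1
  · intro row hrow
    have : row.length ∈ (pvS g r c v).map List.length := List.mem_map_of_mem hrow
    rw [hm] at this
    obtain ⟨row', hrow', hlen⟩ := List.mem_map.mp this
    rw [← hlen]
    exact hs.2 row' hrow' 

theorem pvIdx_nonneg_lt {n : Nat} {i : Int} (h0 : 0 ≤ i) (h1 : i < (n : Int)) :
    PySem.List.pyIdx? n i = some i.toNat := by
  unfold PySem.List.pyIdx?
  split_ifs <;> first | rfl | omega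

theorem pvInRb_iff (R C : Int) (p : Int × Int) :
    pvInRb R C p = true ↔ 0 ≤ p.1 ∧ p.1 < R ∧ 0 ≤ p.2 ∧ p.2 < C := by
  unfold pvInRb; simp; tauto

theorem pvFst_lt {α : Type} (R C : Int) (g : List (List α)) (hs : pvShape R C g)
    (p : Int × Int) (hp : pvInRb R C p = true) : p.1.toNat < g.length := by
  rw [pvInRb_iff] at hp
  have := hs.1
  omega

theorem pvRow_lt {α : Type} (R C : Int) (g : List (List α)) (hs : pvShape R C g)
    (p : Int × Int) (hp : pvInRb R C p = true) (h1 : p.1.toNat < g.length) :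
    p.2.toNat < g[p.1.toNat].length := by
  rw [pvInRb_iff] at hp
  have := hs.2 _ (List.getElem_mem h1)
  omega

theorem pvG_elem {α : Type} (dflt : α) (g : List (List α)) (p : Int × Int)
    (hp0 : 0 ≤ p.1) (hp2 : 0 ≤ p.2)
    (h1 : p.1.toNat < g.length) (h2 : p.2.toNat < g[p.1.toNat].length) :
    pvG dflt g p.1 p.2 = g[p.1.toNat][p.2.toNat] := by
  unfold pvG PySem.List.pyGet?
  rw [pvIdx_nonneg_lt hp0 (by omega)]
  simp only [Option.bind_some, List.getElem?_eq_getElem h1]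
  rw [pvIdx_nonneg_lt hp2 (by omega)]
  simp [List.getElem?_eq_getElem h2]

theorem pvS_elem {α : Type} (g : List (List α)) (q : Int × Int) (v : α)
    (hq0 : 0 ≤ q.1) (hq2 : 0 ≤ q.2)
    (h1 : q.1.toNat < g.length) (h2 : q.2.toNat < g[q.1.toNat].length) :
    pvS g q.1 q.2 v = g.set q.1.toNat (g[q.1.toNat].set q.2.toNat v) := by
  unfold pvS PySem.List.pySetD PySem.List.pySet? PySem.List.pyGetD PySem.List.pyGet?
  rw [pvIdx_nonneg_lt hq0 (by omega)]
  simp only [Option.bind_some, List.getElem?_eq_getElem h1, Option.getD_some]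
  rw [pvIdx_nonneg_lt hq2 (by omega)]
  simp

theorem pvG_pvS {α : Type} (dflt v : α) (R C : Int) (g : List (List α))
    (hs : pvShape R C g) (q p : Int × Int)
    (hq : pvInRb R C q = true) (hp : pvInRb R C p = true) :
    pvG dflt (pvS g q.1 q.2 v) p.1 p.2 = if p = q then v else pvG dflt g p.1 p.2 := by
  have hq1 := pvFst_lt R C g hs q hq
  have hq2 := pvRow_lt R C g hs q hq hq1
  have hp1 := pvFst_lt R C g hs p hp
  have hp2 := pvRow_lt R C g hs p hp hp1
  rw [pvInRb_iff] at hp hq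
  rw [pvS_elem g q v hq.1 hq.2.2.1 hq1 hq2]
  have hp1' : p.1.toNat < (g.set q.1.toNat (g[q.1.toNat].set q.2.toNat v)).length := by
    simpa using hp1
  have hrow : (g.set q.1.toNat (g[q.1.toNat].set q.2.toNat v))[p.1.toNat]
      = if q.1.toNat = p.1.toNat then g[q.1.toNat].set q.2.toNat v else g[p.1.toNat] :=
    List.getElem_set hp1'
  have hp2' : p.2.toNat < (g.set q.1.toNat
      (g[q.1.toNat].set q.2.toNat v))[p.1.toNat].length := by
    rw [hrow]; split_ifs with h <;> simp_all
  rw [pvG_elem dflt _ p hp.1 hp.2.2.1 hp1' hp2',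
    pvG_elem dflt g p hp.1 hp.2.2.1 hp1 hp2]
  by_cases e1 : q.1.toNat = p.1.toNat
  · by_cases e2 : q.2.toNat = p.2.toNat
    · have hpq : p = q := by
        rcases p with ⟨pa, pb⟩; rcases q with ⟨qa, qb⟩
        simp_all only
        exact Prod.ext (by omega) (by omega)
      rw [if_pos hpq]
      have : (g.set q.1.toNat (g[q.1.toNat].set q.2.toNat v))[p.1.toNat]'hp1'
          = g[q.1.toNat].set q.2.toNat v := by rw [hrow, if_pos e1]
      simp only [this] at hp2' ⊢
      rw [List.getElem_set, if_pos e2]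
    · have hpq : p ≠ q := by
        intro h; subst h; exact e2 rfl
      rw [if_neg hpq]
      have : (g.set q.1.toNat (g[q.1.toNat].set q.2.toNat v))[p.1.toNat]'hp1'
          = g[q.1.toNat].set q.2.toNat v := by rw [hrow, if_pos e1]
      simp only [this] at hp2' ⊢
      rw [List.getElem_set, if_neg e2]
      simp only [e1]
  · have hpq : p ≠ q := by
      intro h; subst h; exact e1 rfl
    rw [if_neg hpq]
    have : (g.set q.1.toNat (g[q.1.toNat].set q.2.toNat v))[p.1.toNat]'hp1'
        = g[p.1.toNat] := by rw [hrow, if_neg e1]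
    simp only [this] at hp2' ⊢

-- ---------- cells ----------

theorem pvMem_cells (R C : Int) (p : Int × Int) :
    p ∈ pvCells R C ↔ pvInRb R C p = true := by
  unfold pvCells
  rw [pvInRb_iff]
  simp only [List.mem_flatMap, List.mem_map, PySem.List.mem_pyRange_one]
  constructor
  · rintro ⟨r, hr, c, hc, rfl⟩
    exact ⟨hr.1, hr.2, hc.1, hc.2⟩
  · rintro ⟨h1, h2, h3, h4⟩
    exact ⟨p.1, ⟨h1, h2⟩, p.2, ⟨h3, h4⟩, rfl⟩

theorem pvCells_nodup (R C : Int) : (pvCells R C).Nodup := by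
  unfold pvCells
  rw [List.nodup_flatMap]
  constructor
  · intro r _
    exact (PySem.List.nodup_pyRange_one 0 C).map (fun a b h => by simpa using h)
  · refine List.Pairwise.imp ?_ (PySem.List.pairwise_lt_pyRange_one 0 R)
    intro a b hab
    intro x hxa hxb
    simp only [List.mem_map] at hxa hxb
    obtain ⟨c1, -, rfl⟩ := hxa
    obtain ⟨c2, -, h⟩ := hxb
    exact absurd (congrArg Prod.fst h) (by simp; omega)

-- ---------- counting ----------

-- not in the library in this combined form (countP over a conjunction with a test and its negation)
theorem pvCountP_split {α : Type} (l : List α) (A B : α → Bool) :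
    l.countP A = l.countP (fun x => A x && B x) + l.countP (fun x => A x && !B x) := by
  induction l with
  | nil => simp
  | cons a l ih =>
    simp only [List.countP_cons]
    cases hA : A a <;> cases hB : B a <;> simp <;> omega

theorem pvSdeg_congr (P Q : Int × Int → Bool) (h : ∀ x, P x = Q x) (p : Int × Int) :
    pvSdeg P p = pvSdeg Q p := by
  unfold pvSdeg
  exact List.countP_congr (fun x _ => by rw [h])

theorem pvSdeg_mono (P Q : Int × Int → Bool) (h : ∀ x, P x = true → Q x = true)
    (p : Int × Int) : pvSdeg P p ≤ pvSdeg Q p := by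
  unfold pvSdeg
  exact List.countP_mono_left (fun x _ => h _)

theorem pvDirs_neg (dd : Int × Int) (h : dd ∈ pvDirs) : (-dd.1, -dd.2) ∈ pvDirs := by
  simp only [pvDirs, List.mem_cons, List.not_mem_nil, or_false] at h ⊢
  rcases h with h | h | h | h | h | h | h | h <;> subst h <;> simp

theorem pvDirs_symm (p q : Int × Int) :
    ((q.1 - p.1, q.2 - p.2) ∈ pvDirs) ↔ ((p.1 - q.1, p.2 - q.2) ∈ pvDirs) := by
  constructor <;> intro h <;>
    simpa [show ∀ a b : Int, -(a - b) = b - a from fun a b => by ring] using pvDirs_neg _ h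

theorem pvSdeg_remove (P : Int × Int → Bool) (q p : Int × Int) (hq : P q = true) :
    pvSdeg P p = pvSdeg (fun x => P x && !(x == q)) p
      + (if (q.1 - p.1, q.2 - p.2) ∈ pvDirs then 1 else 0) := by
  unfold pvSdeg
  rw [pvCountP_split pvDirs (fun dd => P (p.1 + dd.1, p.2 + dd.2))
    (fun dd => (p.1 + dd.1, p.2 + dd.2) == q), Nat.add_comm]
  congr 1
  have he : ∀ dd ∈ pvDirs,
      ((P (p.1 + dd.1, p.2 + dd.2) && ((p.1 + dd.1, p.2 + dd.2) == q)) = true)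
        ↔ ((dd == ((q.1 - p.1, q.2 - p.2) : Int × Int)) = true) := by
    intro dd _
    simp only [Bool.and_eq_true, beq_iff_eq]
    constructor
    · rintro ⟨-, h⟩
      have h1 := congrArg Prod.fst h
      have h2 := congrArg Prod.snd h
      simp only at h1 h2
      exact Prod.ext (by simp; omega) (by simp; omega)
    · rintro h
      have h1 := congrArg Prod.fst h
      have h2 := congrArg Prod.snd h
      simp only at h1 h2
      have hx : (p.1 + dd.1, p.2 + dd.2) = q :=
        Prod.ext (by simp; omega) (by simp; omega)
      exact ⟨by rw [hx]; exact hq, hx⟩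
  rw [List.countP_congr he, ← List.count_eq_countP]
  rw [List.Nodup.count (by unfold pvDirs; decide)]

-- ---------- effect of one removal ----------

theorem pvLive_set2 (R C : Int) (g : List (List Char)) (hs : pvShape R C g)
    (q : Int × Int) (hq : pvInRb R C q = true) (p : Int × Int) :
    pvLive R C (pvSet2 g q.1 q.2 '.') p = (pvLive R C g p && !(p == q)) := by
  unfold pvLive
  rw [pvSet2_eq_pvS, pvGet2_eq_pvG, pvGet2_eq_pvG]
  by_cases hp : pvInRb R C p = true
  · rw [pvG_pvS '.' '.' R C g hs q p hq hp]
    by_cases hpq : p = q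
    · simp [hp, hpq]
    · simp [hp, hpq]
  · simp only [Bool.not_eq_true] at hp
    simp [hp]

theorem pvLcount_set2 (R C : Int) (g : List (List Char)) (hs : pvShape R C g)
    (q : Int × Int) (hlive : pvLive R C g q = true) :
    pvLcount R C g = pvLcount R C (pvSet2 g q.1 q.2 '.') + 1 := by
  have hq : pvInRb R C q = true := by
    unfold pvLive at hlive
    exact (Bool.and_eq_true_iff.mp hlive).1
  unfold pvLcount
  rw [pvCountP_split (pvCells R C) (fun p => pvLive R C g p) (fun p => p == q)]
  have c2 : (pvCells R C).countP (fun p => pvLive R C (pvSet2 g q.1 q.2 '.') p)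
      = (pvCells R C).countP (fun p => pvLive R C g p && !(p == q)) :=
    List.countP_congr (fun x _ => by rw [pvLive_set2 R C g hs q hq x])
  have c1 : (pvCells R C).countP (fun p => pvLive R C g p && (p == q)) = 1 := by
    have e2 : (pvCells R C).countP (fun p => pvLive R C g p && (p == q))
        = (pvCells R C).countP (fun p => p == q) := by
      refine List.countP_congr (fun x _ => ?_)
      simp only [Bool.and_eq_true, beq_iff_eq]
      constructor
      · rintro ⟨-, h⟩; exact h
      · rintro rfl; exact ⟨hlive, rfl⟩
    rw [e2, ← List.count_eq_countP, List.Nodup.count (pvCells_nodup R C)]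
    rw [if_pos ((pvMem_cells R C q).mpr hq)]
  omega

-- neighbour count seen by the ports = pvSdeg of the live predicate
theorem pvNb_eq_sdeg (g : List (List Char)) (R C r c : Int) :
    pvNb g R C r c = (pvSdeg (pvLive R C g) (r, c) : Int) := by
  unfold pvNb pvSdeg
  have he : ∀ dd : Int × Int,
      (if 0 ≤ r + dd.1 ∧ r + dd.1 < R ∧ 0 ≤ c + dd.2 ∧ c + dd.2 < C ∧
          pvGet2 g (r + dd.1) (c + dd.2) = '@' then (1 : Int) else 0)
        = if pvLive R C g (r + dd.1, c + dd.2) = true then (1 : Int) else 0 := by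
    intro dd
    unfold pvLive
    simp only [Bool.and_eq_true, beq_iff_eq, pvInRb_iff]
    split_ifs with h1 h2 <;> first | rfl | (exfalso; tauto)
  rw [List.map_congr_left (fun dd _ => he dd)]
  exact PySem.List.sum_map_ite_one_zero (fun x => pvLive R C g (r + x.1, c + x.2)) pvDirs

-- ---------- A: initial deg table and queue ----------

theorem pvDeg0_shape (g : List (List Char)) (R C : Int) (hR : (g.length : Int) = R)
    (hC : 0 ≤ C) : pvShape R C (pvDeg0 g R C) := by
  have hR0 : (0:Int) ≤ R := hR ▸ Int.natCast_nonneg _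
  constructor
  · unfold pvDeg0
    simp [PySem.List.length_pyRange_one]
    omega
  · intro row hrow
    unfold pvDeg0 at hrow
    obtain ⟨r, -, rfl⟩ := List.mem_map.mp hrow
    simp [PySem.List.length_pyRange_one]

theorem pvDget_deg0 (g : List (List Char)) (R C : Int) (hR : (g.length : Int) = R)
    (r c : Int) (h : pvInRb R C (r, c) = true) :
    pvDget (pvDeg0 g R C) r c = if pvGet2 g r c = '@' then pvNb g R C r c else 0 := by
  rw [pvInRb_iff] at h
  simp only at h
  obtain ⟨h1, h2, h3, h4⟩ := h
  have hC : (0:Int) ≤ C := by omega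
  rw [pvDget_eq_pvG]
  unfold pvG PySem.List.pyGet? pvDeg0
  have hlen : ((PySem.List.pyRange 0 R 1).map (fun r =>
      (PySem.List.pyRange 0 C 1).map (fun c =>
        if pvGet2 g r c = '@' then pvNb g R C r c else 0))).length = R.toNat := by
    simp [PySem.List.length_pyRange_one]
  rw [hlen, pvIdx_nonneg_lt h1 (by omega)]
  simp only [Option.bind_some]
  rw [show R = ((g.length : Nat) : Int) from hR.symm]
  rw [PySem.List.getElem?_map_pyRange_zero _ g.length r.toNat (by omega)]
  simp only [Option.bind_some]
  have hlen2 : ((PySem.List.pyRange 0 C 1).map (fun c =>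
      if pvGet2 g ↑r.toNat c = '@' then pvNb g (↑g.length) C ↑r.toNat c else 0)).length
      = C.toNat := by
    simp [PySem.List.length_pyRange_one]
  rw [hlen2, pvIdx_nonneg_lt h3 (by omega)]
  simp only [Option.bind_some]
  rw [show C = ((C.toNat : Nat) : Int) by omega]
  rw [PySem.List.getElem?_map_pyRange_zero _ C.toNat c.toNat (by omega)]
  simp only [Option.getD_some]
  rw [show ((r.toNat : Nat) : Int) = r by omega, show ((c.toNat : Nat) : Int) = c by omega,
    hR, show ((C.toNat : Nat) : Int) = C by omega]

theorem pvMem_q0 (g : List (List Char)) (deg : List (List Int)) (R C : Int) (p : Int × Int) :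
    p ∈ ((PySem.List.pyRange 0 R 1).flatMap (fun r =>
      (PySem.List.pyRange 0 C 1).filterMap (fun c =>
        if pvGet2 g r c = '@' ∧ pvDget deg r c < 4 then some (r, c) else none)))
    ↔ (pvInRb R C p = true ∧ pvGet2 g p.1 p.2 = '@' ∧ pvDget deg p.1 p.2 < 4) := by
  rw [pvInRb_iff]
  simp only [List.mem_flatMap, List.mem_filterMap, PySem.List.mem_pyRange_one]
  constructor
  · rintro ⟨r, hr, c, hc, hif⟩
    split_ifs at hif with hcond
    cases hif
    exact ⟨⟨hr.1, hr.2, hc.1, hc.2⟩, hcond.1, hcond.2⟩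
  · rintro ⟨⟨b1, b2, b3, b4⟩, h5, h6⟩
    exact ⟨p.1, ⟨b1, b2⟩, p.2, ⟨b3, b4⟩, by rw [if_pos ⟨h5, h6⟩]⟩

theorem pvMem_doomed (g : List (List Char)) (R C : Int) (p : Int × Int) :
    p ∈ pvDoomed g R C ↔ (pvLive R C g p = true ∧ pvSdeg (pvLive R C g) p < 4) := by
  unfold pvDoomed
  unfold pvLive
  simp only [List.mem_flatMap, List.mem_filterMap, PySem.List.mem_pyRange_one,
    Bool.and_eq_true, beq_iff_eq, pvInRb_iff]
  constructor
  · rintro ⟨r, hr, c, hc, hif⟩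
    split_ifs at hif with hcond
    cases hif
    have := hcond.2
    rw [pvNb_eq_sdeg] at this
    exact ⟨⟨⟨hr.1, hr.2, hc.1, hc.2⟩, hcond.1⟩, by exact_mod_cast this⟩
  · rintro ⟨⟨⟨b1, b2, b3, b4⟩, h5⟩, h6⟩
    refine ⟨p.1, ⟨b1, b2⟩, p.2, ⟨b3, b4⟩, ?_⟩
    rw [if_pos ⟨h5, by rw [pvNb_eq_sdeg]; exact_mod_cast h6⟩]

theorem pvDoomed_nodup (g : List (List Char)) (R C : Int) : (pvDoomed g R C).Nodup := by
  unfold pvDoomed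
  rw [List.nodup_flatMap]
  constructor
  · intro r _
    refine (PySem.List.nodup_pyRange_one 0 C).filterMap ?_
    intro a b x h1 h2
    simp only [Option.mem_def] at h1 h2
    split_ifs at h1 h2
    have e1 := Option.some.inj h1
    have e2 := Option.some.inj h2
    rw [← e2] at e1
    exact congrArg Prod.snd e1
  · refine List.Pairwise.imp ?_ (PySem.List.pairwise_lt_pyRange_one 0 R)
    intro a b hab x hxa hxb
    simp only [List.mem_filterMap, Option.mem_def] at hxa hxb
    obtain ⟨c1, -, h1⟩ := hxa
    obtain ⟨c2, -, h2⟩ := hxb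
    split_ifs at h1 h2
    have e1 := Option.some.inj h1
    have e2 := Option.some.inj h2
    rw [← e2] at e1
    have := congrArg Prod.fst e1
    simp at this
    omega

-- ---------- A: the inner for-loop ----------

theorem pvLive_iff (R C : Int) (g : List (List Char)) (p : Int × Int) :
    pvLive R C g p = true ↔
      0 ≤ p.1 ∧ p.1 < R ∧ 0 ≤ p.2 ∧ p.2 < C ∧ pvGet2 g p.1 p.2 = '@' := by
  unfold pvLive
  simp only [Bool.and_eq_true, beq_iff_eq, pvInRb_iff]
  tauto

theorem pvDget_dset (R C : Int) (deg : List (List Int)) (hs : pvShape R C deg)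
    (q p : Int × Int) (hq : pvInRb R C q = true) (hp : pvInRb R C p = true) (v : Int) :
    pvDget (pvDset deg q.1 q.2 v) p.1 p.2 = if p = q then v else pvDget deg p.1 p.2 := by
  rw [pvDset_eq_pvS, pvDget_eq_pvG, pvDget_eq_pvG]
  exact pvG_pvS 0 v R C deg hs q p hq hp

theorem pvMem_targets (r c : Int) (x : Int × Int) :
    x ∈ pvDirs.map (fun dd => (r + dd.1, c + dd.2)) ↔ (x.1 - r, x.2 - c) ∈ pvDirs := by
  simp only [List.mem_map]
  constructor
  · rintro ⟨dd, hdd, rfl⟩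
    simpa using hdd
  · intro h
    exact ⟨(x.1 - r, x.2 - c), h, by rcases x with ⟨a, b⟩; simp⟩

theorem pvStep_go (R C : Int) (g2 : List (List Char)) (r c : Int) :
    ∀ (ds : List (Int × Int)) (deg : List (List Int)) (q : List (Int × Int)),
    pvShape R C deg →
    (ds.map (fun dd => (r + dd.1, c + dd.2))).Nodup →
    pvShape R C (ds.foldl (fun s dd =>
      let nr := r + dd.1
      let nc := c + dd.2
      if 0 ≤ nr ∧ nr < R ∧ 0 ≤ nc ∧ nc < C ∧ pvGet2 g2 nr nc = '@' then
        let deg2 := pvDset s.1 nr nc (pvDget s.1 nr nc - 1)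
        (deg2, if pvDget deg2 nr nc = 3 then s.2 ++ [(nr, nc)] else s.2)
      else s) (deg, q)).1 ∧
    (∀ x : Int × Int, pvInRb R C x = true →
      pvDget (ds.foldl (fun s dd =>
        let nr := r + dd.1
        let nc := c + dd.2
        if 0 ≤ nr ∧ nr < R ∧ 0 ≤ nc ∧ nc < C ∧ pvGet2 g2 nr nc = '@' then
          let deg2 := pvDset s.1 nr nc (pvDget s.1 nr nc - 1)
          (deg2, if pvDget deg2 nr nc = 3 then s.2 ++ [(nr, nc)] else s.2)
        else s) (deg, q)).1 x.1 x.2 =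
        if x ∈ ds.map (fun dd => (r + dd.1, c + dd.2)) ∧ pvLive R C g2 x = true
        then pvDget deg x.1 x.2 - 1 else pvDget deg x.1 x.2) ∧
    (∀ x ∈ q, x ∈ (ds.foldl (fun s dd =>
      let nr := r + dd.1
      let nc := c + dd.2
      if 0 ≤ nr ∧ nr < R ∧ 0 ≤ nc ∧ nc < C ∧ pvGet2 g2 nr nc = '@' then
        let deg2 := pvDset s.1 nr nc (pvDget s.1 nr nc - 1)
        (deg2, if pvDget deg2 nr nc = 3 then s.2 ++ [(nr, nc)] else s.2)
      else s) (deg, q)).2) ∧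
    (∀ x : Int × Int, x ∈ ds.map (fun dd => (r + dd.1, c + dd.2)) →
      pvLive R C g2 x = true → pvDget deg x.1 x.2 - 1 = 3 →
      x ∈ (ds.foldl (fun s dd =>
        let nr := r + dd.1
        let nc := c + dd.2
        if 0 ≤ nr ∧ nr < R ∧ 0 ≤ nc ∧ nc < C ∧ pvGet2 g2 nr nc = '@' then
          let deg2 := pvDset s.1 nr nc (pvDget s.1 nr nc - 1)
          (deg2, if pvDget deg2 nr nc = 3 then s.2 ++ [(nr, nc)] else s.2)
        else s) (deg, q)).2) ∧
    (∀ x ∈ (ds.foldl (fun s dd =>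
      let nr := r + dd.1
      let nc := c + dd.2
      if 0 ≤ nr ∧ nr < R ∧ 0 ≤ nc ∧ nc < C ∧ pvGet2 g2 nr nc = '@' then
        let deg2 := pvDset s.1 nr nc (pvDget s.1 nr nc - 1)
        (deg2, if pvDget deg2 nr nc = 3 then s.2 ++ [(nr, nc)] else s.2)
      else s) (deg, q)).2, x ∈ q ∨
        (x ∈ ds.map (fun dd => (r + dd.1, c + dd.2)) ∧ pvLive R C g2 x = true ∧
          pvDget deg x.1 x.2 - 1 = 3)) := by
  intro ds
  induction ds with
  | nil =>
    intro deg q hs _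
    refine ⟨hs, ?_, ?_, ?_, ?_⟩
    · intro x _
      simp
    · intro x hx
      simpa using hx
    · intro x hx
      simp at hx
    · intro x hx
      simp only [List.foldl_nil] at hx
      exact Or.inl hx
  | cons dd ds ih =>
    intro deg q hs hnd
    rw [List.map_cons, List.nodup_cons] at hnd
    obtain ⟨hu_notin, hnd'⟩ := hnd
    simp only [List.foldl_cons]
    by_cases hG : 0 ≤ r + dd.1 ∧ r + dd.1 < R ∧ 0 ≤ c + dd.2 ∧ c + dd.2 < C ∧
        pvGet2 g2 (r + dd.1) (c + dd.2) = '@'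
    · have hlu : pvLive R C g2 (r + dd.1, c + dd.2) = true := (pvLive_iff R C g2 _).mpr hG
      have hiu : pvInRb R C (r + dd.1, c + dd.2) = true := by
        rw [pvInRb_iff]
        exact ⟨hG.1, hG.2.1, hG.2.2.1, hG.2.2.2.1⟩
      rw [if_pos hG]
      set u : Int × Int := (r + dd.1, c + dd.2) with hu
      set deg1 := pvDset deg u.1 u.2 (pvDget deg u.1 u.2 - 1) with hdeg1
      have hs1 : pvShape R C deg1 := by
        rw [hdeg1, pvDset_eq_pvS]
        exact pvShape_pvS R C deg hs u.1 u.2 _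
      have hget1 : ∀ x : Int × Int, pvInRb R C x = true →
          pvDget deg1 x.1 x.2 = if x = u then pvDget deg u.1 u.2 - 1
            else pvDget deg x.1 x.2 := by
        intro x hx
        rw [hdeg1]
        exact pvDget_dset R C deg hs u x hiu hx _
      have hget1u : pvDget deg1 u.1 u.2 = pvDget deg u.1 u.2 - 1 := by
        rw [hget1 u hiu, if_pos rfl]
      obtain ⟨i1, i2, i3, i4, i5⟩ := ih deg1
        (if pvDget deg1 u.1 u.2 = 3 then q ++ [u] else q) hs1 hnd'
      refine ⟨i1, ?_, ?_, ?_, ?_⟩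
      · intro x hx
        rw [i2 x hx]
        by_cases hxu : x = u
        · subst hxu
          rw [if_neg (fun hcon => hu_notin hcon.1), if_pos ⟨by rw [List.map_cons]; exact List.mem_cons_self, hlu⟩]
          rw [hget1 _ hx, if_pos rfl]
        · have hmem : (x ∈ (dd :: ds).map (fun dd => (r + dd.1, c + dd.2)))
              ↔ x ∈ ds.map (fun dd => (r + dd.1, c + dd.2)) := by
            simp only [List.map_cons, List.mem_cons]
            constructor
            · rintro (h | h)
              · exact absurd h hxu
              · exact h
            · exact Or.inr
          rw [hget1 _ hx, if_neg hxu]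
          by_cases hc2 : x ∈ ds.map (fun dd => (r + dd.1, c + dd.2)) ∧
              pvLive R C g2 x = true
          · rw [if_pos hc2, if_pos ⟨hmem.mpr hc2.1, hc2.2⟩]
          · rw [if_neg hc2, if_neg (fun hcon => hc2 ⟨hmem.mp hcon.1, hcon.2⟩)]
      · intro x hx
        refine i3 x ?_
        split_ifs
        · exact List.mem_append_left _ hx
        · exact hx
      · intro x hmem hlx hdx
        rw [List.map_cons, List.mem_cons] at hmem
        rcases hmem with hxu | hxtail
        · have hxu' : x = u := hxu
          refine i3 x ?_
          have h3' : pvDget deg1 u.1 u.2 = 3 := by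
            rw [hget1u, ← hxu']
            exact hdx
          rw [if_pos h3']
          exact List.mem_append_right _ (by rw [hxu']; exact List.mem_singleton.mpr rfl)
        · have hxu : x ≠ u := fun h => hu_notin (h ▸ hxtail)
          refine i4 x hxtail hlx ?_
          have hx : pvInRb R C x = true := by
            rw [pvLive_iff] at hlx
            rw [pvInRb_iff]
            exact ⟨hlx.1, hlx.2.1, hlx.2.2.1, hlx.2.2.2.1⟩
          rw [hget1 x hx, if_neg hxu]
          exact hdx
      · intro x hx
        rcases i5 x hx with hq1 | ⟨hmem, hlx, hdx⟩
        · split_ifs at hq1 with h3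
          · rcases List.mem_append.mp hq1 with hq2 | hq2
            · exact Or.inl hq2
            · have hxu : x = u := List.mem_singleton.mp hq2
              refine Or.inr ⟨by rw [List.map_cons, hxu]; exact List.mem_cons_self,
                by rw [hxu]; exact hlu, ?_⟩
              rw [hxu, ← hget1u]
              exact h3
          · exact Or.inl hq1
        · have hxu : x ≠ u := fun h => hu_notin (h ▸ hmem)
          have hx : pvInRb R C x = true := by
            rw [pvLive_iff] at hlx
            rw [pvInRb_iff]
            exact ⟨hlx.1, hlx.2.1, hlx.2.2.1, hlx.2.2.2.1⟩
          refine Or.inr ⟨by simp only [List.map_cons, List.mem_cons]; exact Or.inr hmem,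
            hlx, ?_⟩
          rw [hget1 x hx, if_neg hxu] at hdx
          exact hdx
    · have hlu : pvLive R C g2 (r + dd.1, c + dd.2) = false := by
        rw [← Bool.not_eq_true, pvLive_iff]
        exact hG
      rw [if_neg hG]
      obtain ⟨i1, i2, i3, i4, i5⟩ := ih deg q hs hnd'
      refine ⟨i1, ?_, i3, ?_, ?_⟩
      · intro x hx
        rw [i2 x hx]
        by_cases hxu : x = (r + dd.1, c + dd.2)
        · subst hxu
          rw [if_neg (fun hcon => hu_notin hcon.1),
            if_neg (fun hcon => by rw [hlu] at hcon; exact Bool.false_ne_true hcon.2)]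
        · have hmem : (x ∈ (dd :: ds).map (fun dd => (r + dd.1, c + dd.2)))
              ↔ x ∈ ds.map (fun dd => (r + dd.1, c + dd.2)) := by
            simp only [List.map_cons, List.mem_cons]
            constructor
            · rintro (h | h)
              · exact absurd h hxu
              · exact h
            · exact Or.inr
          by_cases hc2 : x ∈ ds.map (fun dd => (r + dd.1, c + dd.2)) ∧
              pvLive R C g2 x = true
          · rw [if_pos hc2, if_pos ⟨hmem.mpr hc2.1, hc2.2⟩]
          · rw [if_neg hc2, if_neg (fun hcon => hc2 ⟨hmem.mp hcon.1, hcon.2⟩)]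
      · intro x hmem hlx hdx
        rw [List.map_cons, List.mem_cons] at hmem
        rcases hmem with hxu | hxtail
        · rw [hxu] at hlx
          rw [hlu] at hlx
          exact absurd hlx (Bool.false_ne_true)
        · exact i4 x hxtail hlx hdx
      · intro x hx
        rcases i5 x hx with hq1 | ⟨hmem, hlx, hdx⟩
        · exact Or.inl hq1
        · exact Or.inr ⟨by simp only [List.map_cons, List.mem_cons]; exact Or.inr hmem,
            hlx, hdx⟩

theorem pvStep_spec (R C : Int) (g2 : List (List Char)) (r c : Int)
    (deg : List (List Int)) (q : List (Int × Int)) (hds : pvShape R C deg) :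
    pvShape R C (pvStep g2 R C r c deg q).1 ∧
    (∀ x : Int × Int, pvInRb R C x = true →
      pvDget (pvStep g2 R C r c deg q).1 x.1 x.2 =
        if (x.1 - r, x.2 - c) ∈ pvDirs ∧ pvLive R C g2 x = true
        then pvDget deg x.1 x.2 - 1 else pvDget deg x.1 x.2) ∧
    (∀ x ∈ q, x ∈ (pvStep g2 R C r c deg q).2) ∧
    (∀ x : Int × Int, (x.1 - r, x.2 - c) ∈ pvDirs → pvLive R C g2 x = true →
      pvDget deg x.1 x.2 - 1 = 3 → x ∈ (pvStep g2 R C r c deg q).2) ∧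
    (∀ x ∈ (pvStep g2 R C r c deg q).2, x ∈ q ∨
      ((x.1 - r, x.2 - c) ∈ pvDirs ∧ pvLive R C g2 x = true ∧
        pvDget deg x.1 x.2 - 1 = 3)) := by
  have hnd : (pvDirs.map (fun dd => (r + dd.1, c + dd.2))).Nodup := by
    refine List.Nodup.map_on ?_ (by unfold pvDirs; decide)
    intro a _ b _ hab
    have h1 := congrArg Prod.fst hab
    have h2 := congrArg Prod.snd hab
    simp only at h1 h2
    rcases a with ⟨a1, a2⟩; rcases b with ⟨b1, b2⟩
    exact Prod.ext (by simp at h1 ⊢; omega) (by simp at h2 ⊢; omega)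
  obtain ⟨i1, i2, i3, i4, i5⟩ := pvStep_go R C g2 r c pvDirs deg q hds hnd
  unfold pvStep
  refine ⟨i1, ?_, i3, ?_, ?_⟩
  · intro x hx
    rw [i2 x hx]
    have hiff := pvMem_targets r c x
    by_cases hc1 : x ∈ pvDirs.map (fun dd => (r + dd.1, c + dd.2)) ∧
        pvLive R C g2 x = true
    · rw [if_pos hc1, if_pos ⟨hiff.mp hc1.1, hc1.2⟩]
    · rw [if_neg hc1, if_neg (fun hcon => hc1 ⟨hiff.mpr hcon.1, hcon.2⟩)]
  · intro x hmem hlx hdx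
    exact i4 x ((pvMem_targets r c x).mpr hmem) hlx hdx
  · intro x hx
    rcases i5 x hx with h | ⟨hmem, h2, h3⟩
    · exact Or.inl h
    · exact Or.inr ⟨(pvMem_targets r c x).mp hmem, h2, h3⟩

-- ---------- A: the while loop ----------

theorem pvAloop_spec (R C : Int) (P : Int × Int → Bool)
    (hP : ∀ p, P p = true → 4 ≤ pvSdeg P p) :
    ∀ (g : List (List Char)) (deg : List (List Int)) (q : List (Int × Int)) (t : Int),
    pvShape R C g →
    pvShape R C deg →
    (∀ p : Int × Int, pvLive R C g p = true →
      pvDget deg p.1 p.2 = (pvSdeg (pvLive R C g) p : Int)) →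
    (∀ p : Int × Int, pvLive R C g p = true → pvSdeg (pvLive R C g) p < 4 → p ∈ q) →
    (∀ p ∈ q, pvInRb R C p = true) →
    (∀ p ∈ q, pvLive R C g p = true → pvSdeg (pvLive R C g) p < 4) →
    (∀ p, P p = true → pvLive R C g p = true) →
    pvShape R C (pvAloop R C g deg q t).1 ∧
    (∀ p, pvLive R C (pvAloop R C g deg q t).1 p = true →
      4 ≤ pvSdeg (pvLive R C (pvAloop R C g deg q t).1) p) ∧
    (∀ p, P p = true → pvLive R C (pvAloop R C g deg q t).1 p = true) ∧
    (∀ p, pvLive R C (pvAloop R C g deg q t).1 p = true → pvLive R C g p = true) ∧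
    (pvAloop R C g deg q t).2
      = t + (pvLcount R C g : Int) - (pvLcount R C (pvAloop R C g deg q t).1 : Int) := by
  intro g deg q t
  induction g, deg, q, t using pvAloop.induct R C with
  | case1 g deg t =>
    intro hsg hsd hdc hcov hqin hqlow hPs
    have he : pvAloop R C g deg [] t = (g, t) := by rw [pvAloop.eq_def]
    rw [he]
    refine ⟨hsg, ?_, hPs, fun p h => h, by simp⟩
    intro p hp
    have hp' : pvLive R C g p = true := hp
    by_contra hlt
    have hlt' : pvSdeg (pvLive R C g) p < 4 := by
      have hx : ¬ 4 ≤ pvSdeg (pvLive R C g) p := hlt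
      omega
    exact absurd (hcov p hp' hlt') List.not_mem_nil
  | case2 g deg t r c q' hne ih =>
    intro hsg hsd hdc hcov hqin hqlow hPs
    have he : pvAloop R C g deg ((r, c) :: q') t = pvAloop R C g deg q' t := by
      rw [pvAloop.eq_def]
      simp [hne]
    rw [he]
    refine ih hsg hsd hdc ?_ ?_ ?_ hPs
    · intro p hp hdeg
      rcases List.mem_cons.mp (hcov p hp hdeg) with hp1 | hp1
      · exfalso
        rw [pvLive_iff] at hp
        rw [hp1] at hp
        exact hne hp.2.2.2.2
      · exact hp1
    · intro p hp
      exact hqin p (List.mem_cons_of_mem _ hp)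
    · intro p hp
      exact hqlow p (List.mem_cons_of_mem _ hp)
  | case3 g deg t r c q' hne g2 st ih =>
    intro hsg hsd hdc hcov hqin hqlow hPs
    rw [show st = pvStep (pvSet2 g r c '.') R C r c deg q' from rfl,
      show g2 = pvSet2 g r c '.' from rfl] at ih
    have hat : pvGet2 g r c = '@' := not_not.mp hne
    have he : pvAloop R C g deg ((r, c) :: q') t
        = pvAloop R C (pvSet2 g r c '.') (pvStep (pvSet2 g r c '.') R C r c deg q').1
          (pvStep (pvSet2 g r c '.') R C r c deg q').2 (t + 1) := by
      rw [pvAloop.eq_def]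
      simp [hat]
    rw [he]
    have hrc_in : pvInRb R C (r, c) = true := hqin (r, c) List.mem_cons_self
    have hlive_rc : pvLive R C g (r, c) = true := by
      rw [pvLive_iff]
      rw [pvInRb_iff] at hrc_in
      exact ⟨hrc_in.1, hrc_in.2.1, hrc_in.2.2.1, hrc_in.2.2.2, hat⟩
    have hsg2 : pvShape R C (pvSet2 g r c '.') := by
      rw [pvSet2_eq_pvS]
      exact pvShape_pvS R C g hsg r c '.'
    have hlive2 : ∀ p, pvLive R C (pvSet2 g r c '.') p
        = (pvLive R C g p && !(p == (r, c))) :=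
      pvLive_set2 R C g hsg (r, c) hrc_in
    have hmono2 : ∀ p : Int × Int, pvLive R C (pvSet2 g r c '.') p = true →
        pvLive R C g p = true := by
      intro p hp
      rw [hlive2 p] at hp
      exact (Bool.and_eq_true_iff.mp hp).1
    have hne2 : ∀ p : Int × Int, pvLive R C (pvSet2 g r c '.') p = true → p ≠ (r, c) := by
      intro p hp
      rw [hlive2 p] at hp
      have := (Bool.and_eq_true_iff.mp hp).2
      simpa using this
    have hlc : pvLcount R C g = pvLcount R C (pvSet2 g r c '.') + 1 :=
      pvLcount_set2 R C g hsg (r, c) hlive_rc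
    obtain ⟨i1, i2, i3, i4, i5⟩ := pvStep_spec R C (pvSet2 g r c '.') r c deg q' hsd
    have hcongr : ∀ p, pvSdeg (pvLive R C (pvSet2 g r c '.')) p
        = pvSdeg (fun x => pvLive R C g x && !(x == (r, c))) p :=
      fun p => pvSdeg_congr _ _ hlive2 p
    have hrem : ∀ p, pvSdeg (pvLive R C g) p
        = pvSdeg (fun x => pvLive R C g x && !(x == (r, c))) p
          + (if ((r, c).1 - p.1, (r, c).2 - p.2) ∈ pvDirs then 1 else 0) :=
      fun p => pvSdeg_remove (pvLive R C g) (r, c) p hlive_rc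
    have hsd2 : ∀ p : Int × Int, pvLive R C (pvSet2 g r c '.') p = true →
        (if (p.1 - r, p.2 - c) ∈ pvDirs then
          pvSdeg (pvLive R C (pvSet2 g r c '.')) p + 1 = pvSdeg (pvLive R C g) p
        else pvSdeg (pvLive R C (pvSet2 g r c '.')) p = pvSdeg (pvLive R C g) p) := by
      intro p hp
      have h1 := hrem p
      rw [← hcongr p] at h1
      have hsym := pvDirs_symm p (r, c)
      split_ifs with hd
      · rw [if_pos (by simpa using hsym.mpr (by simpa using hd))] at h1
        omega
      · rw [if_neg (by
          intro hcon
          exact hd (by simpa using hsym.mp (by simpa using hcon)))] at h1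
        omega
    have hdc2 : ∀ p : Int × Int, pvLive R C (pvSet2 g r c '.') p = true →
        pvDget (pvStep (pvSet2 g r c '.') R C r c deg q').1 p.1 p.2
          = (pvSdeg (pvLive R C (pvSet2 g r c '.')) p : Int) := by
      intro p hp
      have hpin : pvInRb R C p = true := by
        rw [pvLive_iff] at hp
        rw [pvInRb_iff]
        exact ⟨hp.1, hp.2.1, hp.2.2.1, hp.2.2.2.1⟩
      have hlg : pvLive R C g p = true := hmono2 p hp
      rw [i2 p hpin]
      have hs2 := hsd2 p hp
      by_cases hd : (p.1 - r, p.2 - c) ∈ pvDirs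
      · rw [if_pos ⟨hd, hp⟩]
        rw [if_pos hd] at hs2
        rw [hdc p hlg]
        omega
      · rw [if_neg (fun hcon => hd hcon.1)]
        rw [if_neg hd] at hs2
        rw [hdc p hlg, hs2]
    have hcov2 : ∀ p : Int × Int, pvLive R C (pvSet2 g r c '.') p = true →
        pvSdeg (pvLive R C (pvSet2 g r c '.')) p < 4 →
        p ∈ (pvStep (pvSet2 g r c '.') R C r c deg q').2 := by
      intro p hp hdeg
      have hlg := hmono2 p hp
      have hs2 := hsd2 p hp
      by_cases hold : pvSdeg (pvLive R C g) p < 4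
      · rcases List.mem_cons.mp (hcov p hlg hold) with h1 | h1
        · exact absurd h1 (hne2 p hp)
        · exact i3 p h1
      · by_cases hd : (p.1 - r, p.2 - c) ∈ pvDirs
        · refine i4 p hd hp ?_
          rw [if_pos hd] at hs2
          rw [hdc p hlg]
          omega
        · rw [if_neg hd] at hs2
          omega
    have hqin2 : ∀ p ∈ (pvStep (pvSet2 g r c '.') R C r c deg q').2,
        pvInRb R C p = true := by
      intro p hp
      rcases i5 p hp with h1 | ⟨-, h2, -⟩
      · exact hqin p (List.mem_cons_of_mem _ h1)
      · rw [pvLive_iff] at h2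
        rw [pvInRb_iff]
        exact ⟨h2.1, h2.2.1, h2.2.2.1, h2.2.2.2.1⟩
    have hqlow2 : ∀ p ∈ (pvStep (pvSet2 g r c '.') R C r c deg q').2,
        pvLive R C (pvSet2 g r c '.') p = true →
        pvSdeg (pvLive R C (pvSet2 g r c '.')) p < 4 := by
      intro p hp hlp
      have hlg := hmono2 p hlp
      have hs2 := hsd2 p hlp
      rcases i5 p hp with h1 | ⟨hd, -, h3⟩
      · have hlow := hqlow p (List.mem_cons_of_mem _ h1) hlg
        have hmon := pvSdeg_mono _ _ hmono2 p
        by_cases hd : (p.1 - r, p.2 - c) ∈ pvDirs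
        · rw [if_pos hd] at hs2
          omega
        · rw [if_neg hd] at hs2
          omega
      · rw [hdc p hlg] at h3
        rw [if_pos hd] at hs2
        omega
    have hPs2 : ∀ p, P p = true → pvLive R C (pvSet2 g r c '.') p = true := by
      intro p hp
      have hlg := hPs p hp
      have hne_rc : p ≠ (r, c) := by
        intro hcon
        have h1 := hqlow (r, c) List.mem_cons_self hlive_rc
        have h2 := hP p hp
        have h3 := pvSdeg_mono P (pvLive R C g) hPs p
        rw [hcon] at h2 h3
        omega
      rw [hlive2 p, hlg]
      simp [hne_rc]
    obtain ⟨o1, o2, o3, o4, o5⟩ := ih hsg2 i1 hdc2 hcov2 hqin2 hqlow2 hPs2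
    refine ⟨o1, o2, o3, fun p hp => hmono2 p (o4 p hp), ?_⟩
    rw [o5, hlc]
    push_cast
    ring


-- ---------- B: one round ----------

theorem pvFold_get2 (R C : Int) :
    ∀ (ds : List (Int × Int)) (g : List (List Char)), pvShape R C g →
    (∀ p ∈ ds, pvInRb R C p = true) →
    pvShape R C (ds.foldl (fun g2 p => pvSet2 g2 p.1 p.2 '.') g) ∧
    (∀ p : Int × Int, pvInRb R C p = true →
      pvGet2 (ds.foldl (fun g2 p => pvSet2 g2 p.1 p.2 '.') g) p.1 p.2 =
        if p ∈ ds then '.' else pvGet2 g p.1 p.2) := by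
  intro ds
  induction ds with
  | nil =>
    intro g hs _
    exact ⟨hs, fun p _ => by simp⟩
  | cons d ds ih =>
    intro g hs hin
    have hd_in : pvInRb R C d = true := hin d List.mem_cons_self
    have hs1 : pvShape R C (pvSet2 g d.1 d.2 '.') := by
      rw [pvSet2_eq_pvS]
      exact pvShape_pvS R C g hs d.1 d.2 '.'
    obtain ⟨o1, o2⟩ := ih (pvSet2 g d.1 d.2 '.') hs1
      (fun p hp => hin p (List.mem_cons_of_mem _ hp))
    rw [List.foldl_cons]
    refine ⟨o1, ?_⟩
    intro p hp
    rw [o2 p hp]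
    have hset : pvGet2 (pvSet2 g d.1 d.2 '.') p.1 p.2
        = if p = d then '.' else pvGet2 g p.1 p.2 := by
      rw [pvGet2_eq_pvG, pvSet2_eq_pvS, pvGet2_eq_pvG]
      exact pvG_pvS '.' '.' R C g hs d p hd_in hp
    by_cases h1 : p ∈ ds
    · rw [if_pos h1, if_pos (List.mem_cons_of_mem _ h1)]
    · rw [if_neg h1, hset]
      by_cases h2 : p = d
      · rw [if_pos h2, if_pos (by rw [h2]; exact List.mem_cons_self)]
      · rw [if_neg h2, if_neg (by
          intro hcon
          rcases List.mem_cons.mp hcon with h3 | h3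
          · exact h2 h3
          · exact h1 h3)]

theorem pvLcount_fold (R C : Int) :
    ∀ (ds : List (Int × Int)) (g : List (List Char)), pvShape R C g → ds.Nodup →
    (∀ p ∈ ds, pvLive R C g p = true) →
    pvLcount R C g
      = pvLcount R C (ds.foldl (fun g2 p => pvSet2 g2 p.1 p.2 '.') g) + ds.length := by
  intro ds
  induction ds with
  | nil =>
    intro g _ _ _
    simp
  | cons d ds ih =>
    intro g hs hnd hld
    have hlive_d : pvLive R C g d = true := hld d List.mem_cons_self
    have hd_in : pvInRb R C d = true := by
      unfold pvLive at hlive_d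
      exact (Bool.and_eq_true_iff.mp hlive_d).1
    have hs1 : pvShape R C (pvSet2 g d.1 d.2 '.') := by
      rw [pvSet2_eq_pvS]
      exact pvShape_pvS R C g hs d.1 d.2 '.'
    have hlc1 : pvLcount R C g = pvLcount R C (pvSet2 g d.1 d.2 '.') + 1 :=
      pvLcount_set2 R C g hs d hlive_d
    rw [List.nodup_cons] at hnd
    have hld1 : ∀ p ∈ ds, pvLive R C (pvSet2 g d.1 d.2 '.') p = true := by
      intro p hp
      rw [pvLive_set2 R C g hs d hd_in p]
      have h1 : pvLive R C g p = true := hld p (List.mem_cons_of_mem _ hp)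
      have h2 : p ≠ d := fun h => hnd.1 (h ▸ hp)
      simp [h1, h2]
    have := ih (pvSet2 g d.1 d.2 '.') hs1 hnd.2 hld1
    rw [List.foldl_cons, List.length_cons]
    omega

-- ---------- B: the while loop ----------

theorem pvBloop_spec (R C : Int) (P : Int × Int → Bool)
    (hP : ∀ p, P p = true → 4 ≤ pvSdeg P p) :
    ∀ (g : List (List Char)) (total : Int),
    pvShape R C g →
    (∀ p, P p = true → pvLive R C g p = true) →
    pvShape R C (pvBloop R C g total).1 ∧
    (∀ p, pvLive R C (pvBloop R C g total).1 p = true →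
      4 ≤ pvSdeg (pvLive R C (pvBloop R C g total).1) p) ∧
    (∀ p, P p = true → pvLive R C (pvBloop R C g total).1 p = true) ∧
    (∀ p, pvLive R C (pvBloop R C g total).1 p = true → pvLive R C g p = true) ∧
    (pvBloop R C g total).2
      = total + (pvLcount R C g : Int) - (pvLcount R C (pvBloop R C g total).1 : Int) := by
  intro g total
  induction g, total using pvBloop.induct R C with
  | case1 g total hempty =>
    intro hsg hPs
    have he : pvBloop R C g total = (g, total) := by
      rw [pvBloop.eq_def]
      split
      · rfl
      · next p rest hcon => rw [hempty] at hcon; cases hcon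
    rw [he]
    refine ⟨hsg, ?_, hPs, fun p h => h, by simp⟩
    intro p hp
    have hp' : pvLive R C g p = true := hp
    by_contra hlt
    have hlt' : ¬ 4 ≤ pvSdeg (pvLive R C g) p := hlt
    have hmem : p ∈ pvDoomed g R C := (pvMem_doomed g R C p).mpr ⟨hp', by omega⟩
    rw [hempty] at hmem
    cases hmem
  | case2 g total p rest hd ih =>
    intro hsg hPs
    have he : pvBloop R C g total
        = pvBloop R C ((p :: rest).foldl (fun g2 q => pvSet2 g2 q.1 q.2 '.') g)
          (total + ((p :: rest).length : Int)) := by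
      rw [pvBloop.eq_def]
      split
      · next hcon => rw [hd] at hcon; cases hcon
      · next p1 rest1 hcon =>
        rw [hd] at hcon
        cases hcon
        rfl
    rw [he]
    have hld : ∀ x ∈ p :: rest, pvLive R C g x = true := by
      intro x hx
      rw [← hd] at hx
      exact ((pvMem_doomed g R C x).mp hx).1
    have hlow : ∀ x ∈ p :: rest, pvSdeg (pvLive R C g) x < 4 := by
      intro x hx
      rw [← hd] at hx
      exact ((pvMem_doomed g R C x).mp hx).2
    have hnd : (p :: rest).Nodup := hd ▸ pvDoomed_nodup g R C
    have hin : ∀ x ∈ p :: rest, pvInRb R C x = true := by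
      intro x hx
      have := hld x hx
      unfold pvLive at this
      exact (Bool.and_eq_true_iff.mp this).1
    obtain ⟨hsf, hgf⟩ := pvFold_get2 R C (p :: rest) g hsg hin
    have hlf : ∀ x : Int × Int,
        pvLive R C ((p :: rest).foldl (fun g2 q => pvSet2 g2 q.1 q.2 '.') g) x = true ↔
        (pvLive R C g x = true ∧ x ∉ p :: rest) := by
      intro x
      constructor
      · intro hx
        rw [pvLive_iff] at hx
        obtain ⟨b1, b2, b3, b4, b5⟩ := hx
        have hxin : pvInRb R C x = true := by
          rw [pvInRb_iff]; exact ⟨b1, b2, b3, b4⟩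
        rw [hgf x hxin] at b5
        split_ifs at b5 with hmem
        · exact absurd b5 (by decide)
        · exact ⟨by rw [pvLive_iff]; exact ⟨b1, b2, b3, b4, b5⟩, hmem⟩
      · rintro ⟨hx, hnotin⟩
        rw [pvLive_iff] at hx ⊢
        obtain ⟨b1, b2, b3, b4, b5⟩ := hx
        refine ⟨b1, b2, b3, b4, ?_⟩
        rw [hgf x (by rw [pvInRb_iff]; exact ⟨b1, b2, b3, b4⟩), if_neg hnotin]
        exact b5
    have hPs2 : ∀ x, P x = true →
        pvLive R C ((p :: rest).foldl (fun g2 q => pvSet2 g2 q.1 q.2 '.') g) x = true := by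
      intro x hx
      refine (hlf x).mpr ⟨hPs x hx, ?_⟩
      intro hmem
      have h1 := hlow x hmem
      have h2 := hP x hx
      have h3 := pvSdeg_mono P (pvLive R C g) hPs x
      omega
    have hlc := pvLcount_fold R C (p :: rest) g hsg hnd hld
    obtain ⟨o1, o2, o3, o4, o5⟩ := ih hsf hPs2
    refine ⟨o1, o2, o3, fun x hx => ((hlf x).mp (o4 x hx)).1, ?_⟩
    rw [o5, hlc]
    push_cast
    ring

-- ---------- assembly ----------

theorem pv_main (input_data : String) (hpre : Pre_solve input_data) :
    solve input_data = solve_alt input_data := by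
  obtain ⟨hne, hlen⟩ := hpre
  rcases hL : PySem.Str.splitlines (PySem.Str.strip input_data) with _ | ⟨l0, ls⟩
  · exact absurd hL hne
  set g0 : List (List Char) := pvGrid input_data with hg0
  have hg0' : g0 = l0.toList :: ls.map String.toList := by
    rw [hg0]
    unfold pvGrid
    rw [hL, List.map_cons]
  set R : Int := (g0.length : Int) with hR
  set C : Int := ((PySem.List.pyGetD g0 0 []).length : Int) with hC
  have hhead : PySem.List.pyGetD g0 0 [] = l0.toList := by
    rw [hg0']
    simp [PySem.List.pyGetD, PySem.List.pyGet?, PySem.List.pyIdx?]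
  have hCval : C = (l0.toList.length : Int) := by rw [hC, hhead]
  have hshape : pvShape R C g0 := by
    refine ⟨rfl, ?_⟩
    intro row hrow
    rw [hg0'] at hrow
    rcases List.mem_cons.mp hrow with h | h
    · rw [h, hCval]
    · obtain ⟨l, hl, rfl⟩ := List.mem_map.mp h
      have := hlen l (by rw [hL]; exact List.mem_cons_of_mem _ hl)
      rw [hL] at this
      simp only [List.headD_cons] at this
      rw [PySem.Str.len_eq, PySem.Str.len_eq] at this
      omega
  have hC0 : 0 ≤ C := by rw [hC]; exact Int.natCast_nonneg _
  -- the four loop-spec instantiations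
  have hdshape : pvShape R C (pvDeg0 g0 R C) := pvDeg0_shape g0 R C rfl hC0
  have hdc : ∀ p : Int × Int, pvLive R C g0 p = true →
      pvDget (pvDeg0 g0 R C) p.1 p.2 = (pvSdeg (pvLive R C g0) p : Int) := by
    intro p hp
    have hpin : pvInRb R C p = true := by
      unfold pvLive at hp
      exact (Bool.and_eq_true_iff.mp hp).1
    have hat : pvGet2 g0 p.1 p.2 = '@' := by
      unfold pvLive at hp
      have := (Bool.and_eq_true_iff.mp hp).2
      simpa using this
    rw [pvDget_deg0 g0 R C rfl p.1 p.2 hpin, if_pos hat, pvNb_eq_sdeg]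
  have hq0 : ∀ p : Int × Int, p ∈ ((PySem.List.pyRange 0 R 1).flatMap (fun r =>
      (PySem.List.pyRange 0 C 1).filterMap (fun c =>
        if pvGet2 g0 r c = '@' ∧ pvDget (pvDeg0 g0 R C) r c < 4 then some (r, c)
        else none))) ↔ (pvInRb R C p = true ∧ pvGet2 g0 p.1 p.2 = '@' ∧
        pvDget (pvDeg0 g0 R C) p.1 p.2 < 4) :=
    fun p => pvMem_q0 g0 (pvDeg0 g0 R C) R C p
  have hlive_char : ∀ p : Int × Int, pvLive R C g0 p = true ↔
      (pvInRb R C p = true ∧ pvGet2 g0 p.1 p.2 = '@') := by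
    intro p
    unfold pvLive
    simp
  have hcov : ∀ p : Int × Int, pvLive R C g0 p = true →
      pvSdeg (pvLive R C g0) p < 4 → p ∈ ((PySem.List.pyRange 0 R 1).flatMap (fun r =>
      (PySem.List.pyRange 0 C 1).filterMap (fun c =>
        if pvGet2 g0 r c = '@' ∧ pvDget (pvDeg0 g0 R C) r c < 4 then some (r, c)
        else none))) := by
    intro p hp hs4
    obtain ⟨hpin, hat⟩ := (hlive_char p).mp hp
    refine (hq0 p).mpr ⟨hpin, hat, ?_⟩
    rw [hdc p hp]
    omega
  have hqin : ∀ p ∈ ((PySem.List.pyRange 0 R 1).flatMap (fun r =>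
      (PySem.List.pyRange 0 C 1).filterMap (fun c =>
        if pvGet2 g0 r c = '@' ∧ pvDget (pvDeg0 g0 R C) r c < 4 then some (r, c)
        else none))), pvInRb R C p = true :=
    fun p hp => ((hq0 p).mp hp).1
  have hqlow : ∀ p ∈ ((PySem.List.pyRange 0 R 1).flatMap (fun r =>
      (PySem.List.pyRange 0 C 1).filterMap (fun c =>
        if pvGet2 g0 r c = '@' ∧ pvDget (pvDeg0 g0 R C) r c < 4 then some (r, c)
        else none))), pvLive R C g0 p = true → pvSdeg (pvLive R C g0) p < 4 := by
    intro p hp hlp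
    have h4 := ((hq0 p).mp hp).2.2
    rw [hdc p hlp] at h4
    omega
  have hA0 := pvAloop_spec R C (fun _ => false) (by simp) g0 (pvDeg0 g0 R C) _ 0
    hshape hdshape hdc hcov hqin hqlow (by simp)
  have hB0 := pvBloop_spec R C (fun _ => false) (by simp) g0 0 hshape (by simp)
  have hAB := pvAloop_spec R C (pvLive R C (pvBloop R C g0 0).1)
    (fun p hp => hB0.2.1 p hp) g0 (pvDeg0 g0 R C) _ 0
    hshape hdshape hdc hcov hqin hqlow (fun p hp => hB0.2.2.2.1 p hp)
  have hBA := pvBloop_spec R C (pvLive R C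
      (pvAloop R C g0 (pvDeg0 g0 R C) ((PySem.List.pyRange 0 R 1).flatMap (fun r =>
      (PySem.List.pyRange 0 C 1).filterMap (fun c =>
        if pvGet2 g0 r c = '@' ∧ pvDget (pvDeg0 g0 R C) r c < 4 then some (r, c)
        else none))) 0).1)
    (fun p hp => hA0.2.1 p hp) g0 0 hshape (fun p hp => hA0.2.2.2.1 p hp)
  have hlceq : pvLcount R C (pvAloop R C g0 (pvDeg0 g0 R C)
      ((PySem.List.pyRange 0 R 1).flatMap (fun r =>
      (PySem.List.pyRange 0 C 1).filterMap (fun c =>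
        if pvGet2 g0 r c = '@' ∧ pvDget (pvDeg0 g0 R C) r c < 4 then some (r, c)
        else none))) 0).1 = pvLcount R C (pvBloop R C g0 0).1 := by
    unfold pvLcount
    refine List.countP_congr ?_
    intro x _
    constructor
    · intro h
      exact hBA.2.2.1 x h
    · intro h
      exact hAB.2.2.1 x h
  have hta := hA0.2.2.2.2
  have htb := hB0.2.2.2.2
  have : (pvAloop R C g0 (pvDeg0 g0 R C)
      ((PySem.List.pyRange 0 R 1).flatMap (fun r =>
      (PySem.List.pyRange 0 C 1).filterMap (fun c =>
        if pvGet2 g0 r c = '@' ∧ pvDget (pvDeg0 g0 R C) r c < 4 then some (r, c)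
        else none))) 0).2 = (pvBloop R C g0 0).2 := by
    rw [hta, htb, hlceq]
  show PySem.Int.toStr (pvAloop R C g0 (pvDeg0 g0 R C)
      ((PySem.List.pyRange 0 R 1).flatMap (fun r =>
      (PySem.List.pyRange 0 C 1).filterMap (fun c =>
        if pvGet2 g0 r c = '@' ∧ pvDget (pvDeg0 g0 R C) r c < 4 then some (r, c)
        else none))) 0).2 = PySem.Int.toStr (pvBloop R C g0 0).2
  rw [this]

-- ===== VERDICT (by name: the statement is the Claim_ definition above) =====
theorem solve_spec : Claim_equal_solve := by
  intro input _ hpre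
  unfold Spec_solve
  exact pv_main input hpre
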